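-- pv_equiv track=rewrite | github.com/serizawan/aoc | 2020/p06/p6a.py | pop_next_group_answers
-- ===== SOURCE A (Python) =====
-- def pop_next_group_answers(l):
--     if not l:
--         return None
--     member = None
--     group_answers = []
--     while l and (member := l.pop(0)) != '':
--         group_answers.append(member)
--     return group_answers
-- ===== SOURCE B (Python) =====
-- def pop_next_group_answers(l):
--     if not l:
--         return None
--     try:
--         idx = l.index('')
--     except ValueError:
--         idx = len(l)
--     group_answers = l[:idx]
--     del l[:idx + 1]
--     return group_answers
-- ===== Notes on version B (the rewrite author's own statement) =====
-- stated objective: faster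
-- what changed: Replaces the per-element pop(0) loop (each pop shifts the whole remaining list) with a single index() search for the blank separator, one slice, and one bulk del; return value and in-place consumption of the list are identical.
import Mathlib
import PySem

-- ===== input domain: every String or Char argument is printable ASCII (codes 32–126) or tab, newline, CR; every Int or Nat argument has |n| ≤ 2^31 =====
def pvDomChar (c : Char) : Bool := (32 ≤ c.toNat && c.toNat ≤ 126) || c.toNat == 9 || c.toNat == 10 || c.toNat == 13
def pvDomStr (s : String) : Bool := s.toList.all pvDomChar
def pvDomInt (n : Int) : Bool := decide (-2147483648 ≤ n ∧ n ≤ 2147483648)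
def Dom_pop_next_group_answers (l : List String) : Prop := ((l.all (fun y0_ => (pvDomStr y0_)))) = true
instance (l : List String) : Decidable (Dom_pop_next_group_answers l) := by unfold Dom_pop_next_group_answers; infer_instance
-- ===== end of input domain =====

-- B replaces A's repeated pop(0) loop by one index() search plus a slice and a bulk del
-- (objective: alternative decomposition). Both Pythons mutate l identically; the
-- equivalence proved here is about the RETURN value only.

-- ===== PORT A =====
-- the while loop: pop the head while it is nonempty, accumulating group_answers
def popLoopA (l : List String) (acc : List String) : List String :=
  match l with
  | [] => acc
  | x :: xs => if x ≠ "" then popLoopA xs (acc ++ [x]) else acc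

def pop_next_group_answers (l : List String) : Option (List String) :=
  if l = [] then none
  else some (popLoopA l [])

-- ===== PORT B =====
def pop_next_group_answers_alt (l : List String) : Option (List String) :=
  if l = [] then none
  else
    let idx : Nat :=
      match PySem.List.index? l "" with   -- try: l.index('') / except ValueError: len(l)
      | some i => i
      | none => l.length
    some (PySem.List.slice l none (some (idx : Int)))   -- l[:idx]

-- ===== PRECONDITION & SPEC =====
def Spec_pop_next_group_answers (l : List String) (out : Option (List String)) : Prop := out = pop_next_group_answers_alt l
instance (l : List String) (out : Option (List String)) : Decidable (Spec_pop_next_group_answers l out) := by unfold Spec_pop_next_group_answers; infer_instance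

-- ===== CLAIM (what is proved, stated in full; the proofs are below) =====
def Claim_equal_pop_next_group_answers : Prop := ∀ (l : List String), Dom_pop_next_group_answers l → Spec_pop_next_group_answers l (pop_next_group_answers l)

-- ===== LEMMAS AND PROOFS =====

lemma popLoopA_eq (l : List String) (acc : List String) :
    popLoopA l acc = acc ++ (match PySem.List.index? l "" with
      | some i => l.take i
      | none => l) := by
  induction l generalizing acc with
  | nil => simp [popLoopA, PySem.List.index?]
  | cons x xs ih =>
    by_cases hx : x = ""
    · subst hx
      rw [PySem.List.index?_cons_self]
      simp [popLoopA]
    · rw [PySem.List.index?_cons_of_ne xs hx]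
      simp only [popLoopA, if_pos (by exact hx)]
      rw [ih]
      cases h : PySem.List.index? xs "" with
      | none => simp
      | some i => simp

-- ===== VERDICT (by name: the statement is the Claim_ definition above) =====
theorem pop_next_group_answers_spec : Claim_equal_pop_next_group_answers := by
  intro l _
  unfold Spec_pop_next_group_answers pop_next_group_answers pop_next_group_answers_alt
  by_cases hl : l = []
  · simp [hl]
  · simp only [if_neg hl]
    rw [popLoopA_eq]
    cases h : PySem.List.index? l "" with
    | none =>
      rw [PySem.List.slice_to_natCast]
      simp
    | some i =>
      rw [PySem.List.slice_to_natCast]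
      simp
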